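-- pv_equiv track=rewrite | github.com/KartikChauhan2/Planet-Scaller- | planet_scale.py | data_formatter
-- ===== SOURCE A (Python) =====
-- def data_formatter(new_radius,new_orbit_distance,sun_radius):
--     radius_and_orbit_distance={}
--     for planet in [new_radius,new_orbit_distance]:
--         for key, value in planet.items():
--             if key in radius_and_orbit_distance:
--                 radius_and_orbit_distance[key].append(value)
--             else:
--                 radius_and_orbit_distance[key] = [value]
--     output_data = []
--     output_data.append(f"{'Planet Name':<15} {'Radius (meters)':<20} {'Orbit Distance (meters)'}")
--     output_data.append('-' * 50)
--     # Display the sun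
--     sun_radius = radius_and_orbit_distance.get('Sun', [''])[0]
--     output_data.append(f"{'Sun':<15} {sun_radius:<20}")
--     # Display planets
--     for planet, values in radius_and_orbit_distance.items():
--         if planet != 'Sun':
--             radius = values[0]
--             orbit_distance = values[1] if len(values) > 1 else 'N/A'
--             output_data.append(f"{planet:<15} {radius:<20} {orbit_distance}")
--     return "\n".join(output_data)
-- ===== SOURCE B (Python) =====
-- def data_formatter(new_radius, new_orbit_distance, sun_radius):
--     # One flat item list instead of a merged dict-of-lists: per planet, its
--     # values in encounter order are just the values at that key in the list.
--     items = list(new_radius.items()) + list(new_orbit_distance.items())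
--     sun_values = [v for k, v in items if k == 'Sun']
--     sun_text = str(sun_values[0]) if sun_values else ''
--     lines = [f"{'Planet Name':<15} {'Radius (meters)':<20} {'Orbit Distance (meters)'}",
--              '-' * 50,
--              f"{'Sun':<15} {sun_text:<20}"]
--     for planet in dict.fromkeys(k for k, _ in items):
--         if planet == 'Sun':
--             continue
--         values = [v for k, v in items if k == planet]
--         orbit = values[1] if len(values) > 1 else 'N/A'
--         lines.append(f"{planet:<15} {values[0]:<20} {orbit}")
--     return "\n".join(lines)
-- ===== Notes on version B (the rewrite author's own statement) =====
-- stated objective: simpler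
-- what changed: B drops A's dict-of-lists merge entirely: it concatenates the two item lists once and, for each first-occurrence-deduplicated key, reads the radius/orbit slots directly as that key's values in the flat list, with the Sun value taken as the first 'Sun' value of the concatenation.
import Mathlib
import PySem

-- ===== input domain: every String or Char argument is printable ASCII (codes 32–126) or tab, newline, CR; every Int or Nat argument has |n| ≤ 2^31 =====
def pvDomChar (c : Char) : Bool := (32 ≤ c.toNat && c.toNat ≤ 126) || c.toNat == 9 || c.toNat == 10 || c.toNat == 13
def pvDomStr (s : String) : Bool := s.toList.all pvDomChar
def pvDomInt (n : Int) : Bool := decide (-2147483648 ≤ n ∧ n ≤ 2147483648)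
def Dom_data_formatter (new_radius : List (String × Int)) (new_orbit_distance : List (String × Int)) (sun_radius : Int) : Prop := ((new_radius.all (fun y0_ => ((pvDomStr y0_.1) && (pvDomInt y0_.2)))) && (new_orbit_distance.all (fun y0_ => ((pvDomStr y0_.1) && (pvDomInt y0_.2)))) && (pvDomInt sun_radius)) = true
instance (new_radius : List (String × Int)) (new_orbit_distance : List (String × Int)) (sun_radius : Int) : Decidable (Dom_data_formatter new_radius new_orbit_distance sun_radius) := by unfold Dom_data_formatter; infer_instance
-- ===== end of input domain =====

-- B replaces A's dict-of-lists merge by a single concatenated item list with per-key slot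
-- lookups (objective: simpler); proved to return the same table string on every input.


-- shared rendering of the f-strings both Pythons use ('{x:<w}', the header, the separator)
def pvPad (s : List Char) (w : Nat) : List Char := s ++ List.replicate (w - s.length) ' '
def pvHeaderLine : String := String.ofList (pvPad "Planet Name".toList 15 ++ [' '] ++ pvPad "Radius (meters)".toList 20 ++ [' '] ++ "Orbit Distance (meters)".toList)
def pvSepLine : String := String.ofList (List.replicate 50 '-')
def pvSunLine (v : List Char) : String := String.ofList (pvPad "Sun".toList 15 ++ [' '] ++ pvPad v 20)
-- f"{planet:<15} {values[0]:<20} {orbit}" rendered from the planet's value list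
-- (values[0] exists in both programs whenever a row is emitted, so the [] arm is unreachable)
def pvRowLine (planet : String) (vals : List Int) : String :=
  String.ofList (pvPad planet.toList 15 ++ [' '] ++
    pvPad (match vals with | v :: _ => PySem.Int.toChars v | [] => []) 20 ++ [' '] ++
    (match vals with | _ :: w :: _ => PySem.Int.toChars w | _ => "N/A".toList))

-- ===== PORT A =====
def data_formatter (new_radius : List (String × Int)) (new_orbit_distance : List (String × Int)) (sun_radius : Int) : String :=
  let merged : PySem.Dict String (List Int) :=
    [new_radius, new_orbit_distance].foldl (fun d planet =>
      planet.foldl (fun d kv =>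
        if d.contains kv.1 then d.modify kv.1 [] (fun l => l ++ [kv.2])
        else d.insert kv.1 [kv.2]) d) PySem.Dict.empty
  let out0 : List String := [pvHeaderLine, pvSepLine]
  -- sun_radius = radius_and_orbit_distance.get('Sun', [''])[0]; every stored value list
  -- is nonempty, so the 'some []' arm is unreachable (Python would IndexError there)
  let sunChars : List Char :=
    match merged.get? "Sun" with
    | some (v :: _) => PySem.Int.toChars v
    | some [] => []
    | none => []          -- the default [''][0] = ''
  let out1 := out0 ++ [pvSunLine sunChars]
  let out2 := merged.items.foldl (fun acc kv =>
    if kv.1 ≠ "Sun" then acc ++ [pvRowLine kv.1 kv.2] else acc) out1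
  PySem.Str.join "\n" out2

-- ===== PORT B =====
def data_formatter_alt (new_radius : List (String × Int)) (new_orbit_distance : List (String × Int)) (sun_radius : Int) : String :=
  let items := new_radius ++ new_orbit_distance
  let sunVals := (items.filter (fun kv => kv.1 == "Sun")).map (fun kv => kv.2)
  let sunChars : List Char := match sunVals with | v :: _ => PySem.Int.toChars v | [] => []
  let lines0 : List String := [pvHeaderLine, pvSepLine, pvSunLine sunChars]
  let lines := (PySem.List.dedup (items.map (fun kv => kv.1))).foldl (fun acc planet =>
    if planet = "Sun" then acc
    else acc ++ [pvRowLine planet ((items.filter (fun kv => kv.1 == planet)).map (fun kv => kv.2))]) lines0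
  PySem.Str.join "\n" lines

-- ===== PRECONDITION & SPEC =====
def Spec_data_formatter (new_radius : List (String × Int)) (new_orbit_distance : List (String × Int)) (sun_radius : Int) (out : String) : Prop := out = data_formatter_alt new_radius new_orbit_distance sun_radius
instance (new_radius : List (String × Int)) (new_orbit_distance : List (String × Int)) (sun_radius : Int) (out : String) : Decidable (Spec_data_formatter new_radius new_orbit_distance sun_radius out) := by unfold Spec_data_formatter; infer_instance

-- ===== CLAIM (what is proved, stated in full; the proofs are below) =====
def Claim_equal_data_formatter : Prop := ∀ (new_radius : List (String × Int)) (new_orbit_distance : List (String × Int)) (sun_radius : Int), Dom_data_formatter new_radius new_orbit_distance sun_radius → Spec_data_formatter new_radius new_orbit_distance sun_radius (data_formatter new_radius new_orbit_distance sun_radius)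

-- ===== LEMMAS AND PROOFS =====

-- A's merge, rewritten as one Dict.modify fold over the concatenated item list
def pvMerge (L : List (String × Int)) : PySem.Dict String (List Int) :=
  L.foldl (fun d kv => d.modify kv.1 [] (fun l => l ++ [kv.2])) PySem.Dict.empty
theorem pv_keys (L : List (String × Int)) :
    (pvMerge L).keys = PySem.List.dedup (L.map (fun kv => kv.1)) := by
  rw [pvMerge, PySem.Dict.keys_foldl_modify_key L (fun kv => kv.1) [] (fun _ kv => fun l => l ++ [kv.2])]; rfl
theorem pv_nodup (L : List (String × Int)) : (pvMerge L).keys.Nodup :=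
  PySem.Dict.nodup_keys_foldl_modify_key L (fun kv => kv.1) [] (fun _ kv => fun l => l ++ [kv.2]) _ PySem.Dict.nodup_keys_empty
theorem pv_getD (L : List (String × Int)) (k : String) :
    (pvMerge L).getD k [] = (L.filter (fun kv => kv.1 == k)).map (fun kv => kv.2) := by
  rw [pvMerge, PySem.Dict.getD_foldl_modify_append, PySem.Dict.getD_empty]; simp
theorem pv_items (L : List (String × Int)) :
    (pvMerge L).items = (PySem.List.dedup (L.map (fun kv => kv.1))).map
      (fun k => (k, (L.filter (fun kv => kv.1 == k)).map (fun kv => kv.2))) := by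
  rw [PySem.Dict.items_eq_map_keys _ (pv_nodup L) [], pv_keys]
  exact List.map_congr_left (fun k _ => by rw [pv_getD])
theorem pv_sun (L : List (String × Int)) :
    (match (pvMerge L).get? "Sun" with
      | some (v :: _) => PySem.Int.toChars v
      | some [] => ([] : List Char)
      | none => []) =
    (match (L.filter (fun kv => kv.1 == "Sun")).map (fun kv => kv.2) with
      | v :: _ => PySem.Int.toChars v
      | [] => []) := by
  rcases hg : (pvMerge L).get? "Sun" with _ | vs
  · have hc : (pvMerge L).contains "Sun" = false := (PySem.Dict.get?_eq_none_iff_contains _ _).1 hg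
    have hmem : "Sun" ∉ L.map (fun kv => kv.1) := by
      intro hmem
      have : "Sun" ∈ (pvMerge L).keys := by
        rw [pv_keys]; exact (PySem.Set.mem_ofList _ _).2 hmem
      rw [← PySem.Dict.contains_iff_mem_keys] at this
      simp [hc] at this
    have : L.filter (fun kv => kv.1 == "Sun") = [] := by
      rw [List.filter_eq_nil_iff]
      intro kv hkv
      simp only [beq_iff_eq]
      intro h
      exact hmem (List.mem_map.2 ⟨kv, hkv, h⟩)
    simp [this]
  · have hvs : vs = (L.filter (fun kv => kv.1 == "Sun")).map (fun kv => kv.2) := by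
      rw [← pv_getD]; exact (PySem.Dict.getD_of_get?_eq_some _ _ hg).symm
    rw [← hvs]
    cases vs <;> rfl
theorem pv_step_eq (d : PySem.Dict String (List Int)) (kv : String × Int) :
    (if d.contains kv.1 then d.modify kv.1 [] (fun l => l ++ [kv.2])
     else d.insert kv.1 [kv.2]) = d.modify kv.1 [] (fun l => l ++ [kv.2]) := by
  by_cases h : d.contains kv.1
  · simp [h]
  · rw [if_neg h, PySem.Dict.modify, PySem.Dict.getD_of_not_contains (h := by simpa using h)]
    simp

theorem pv_fold_eq (L : List (String × Int)) (d : PySem.Dict String (List Int)) :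
    L.foldl (fun d kv =>
        if d.contains kv.1 then d.modify kv.1 [] (fun l => l ++ [kv.2])
        else d.insert kv.1 [kv.2]) d
      = L.foldl (fun d kv => d.modify kv.1 [] (fun l => l ++ [kv.2])) d :=
  PySem.List.foldl_congr_mem L _ _ d (fun acc kv _ => pv_step_eq acc kv)

theorem pv_rows_fold (g : String → String) (ks : List String) (acc : List String) :
    ks.foldl (fun acc k => if k = "Sun" then acc else acc ++ [g k]) acc
      = acc ++ (ks.filter (fun k => decide (k ≠ "Sun"))).map g := by
  rw [show (fun (acc : List String) k => if k = "Sun" then acc else acc ++ [g k])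
        = (fun (acc : List String) k => if k ≠ "Sun" then acc ++ [g k] else acc) from
      funext fun acc => funext fun k => by by_cases h : k = "Sun" <;> simp [h]]
  exact PySem.List.foldl_append_ite _ g ks acc


-- ===== VERDICT (by name: the statement is the Claim_ definition above) =====
theorem data_formatter_spec : Claim_equal_data_formatter := by
  intro l1 l2 s _
  unfold Spec_data_formatter
  have hmerge : [l1, l2].foldl (fun d planet =>
      planet.foldl (fun d kv =>
        if d.contains kv.1 then d.modify kv.1 [] (fun l => l ++ [kv.2])
        else d.insert kv.1 [kv.2]) d) PySem.Dict.empty = pvMerge (l1 ++ l2) := by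
    show (l2.foldl _ (l1.foldl _ PySem.Dict.empty)) = _
    rw [pv_fold_eq l2, pv_fold_eq l1, pvMerge, List.foldl_append]
  simp only [data_formatter, data_formatter_alt, hmerge]
  congr 1
  rw [pv_items, PySem.List.foldl_append_ite (p := fun kv : String × List Int => kv.1 ≠ "Sun") (f := fun kv : String × List Int => pvRowLine kv.1 kv.2)]
  rw [pv_rows_fold]
  rw [List.filter_map, List.map_map]
  rw [pv_sun]
  simp only [Function.comp_def]
  simp
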